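-- pv_equiv track=rewrite | github.com/cuponomia/dojo | sudoku-2023-08-30/sudoku.py | get_least_empty_cols
-- ===== SOURCE A (Python) =====
-- def get_least_empty_cols(grid):
--     cols = []
--     least_spaces_in_col = len(grid)
--
--     j = 0
--     while j < len(grid):
--         spaces = 0
--         for i in range(len(grid)):
--             if(grid[i][j] == 0):
--                 spaces = spaces + 1
--
--         if (spaces == least_spaces_in_col):
--             cols.append(j)
--
--         elif (spaces < least_spaces_in_col):
--             least_spaces_in_col = spaces
--             cols = [j]
--
--         j += 1
--
--     return cols
-- ===== SOURCE B (Python) =====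
-- def get_least_empty_cols(grid):
--     n = len(grid)
--     counts = [sum(1 for i in range(n) if grid[i][j] == 0) for j in range(n)]
--     if not counts:
--         return []
--     m = min(counts)
--     return [j for j in range(n) if counts[j] == m]
-- ===== Notes on version B (the rewrite author's own statement) =====
-- stated objective: simpler
-- what changed: Replaced the running-minimum while loop with mutating cols/least state by a count-then-min-then-filter decomposition: build the per-column zero-count list, take its minimum, and return the indices attaining it.
import Mathlib
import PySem

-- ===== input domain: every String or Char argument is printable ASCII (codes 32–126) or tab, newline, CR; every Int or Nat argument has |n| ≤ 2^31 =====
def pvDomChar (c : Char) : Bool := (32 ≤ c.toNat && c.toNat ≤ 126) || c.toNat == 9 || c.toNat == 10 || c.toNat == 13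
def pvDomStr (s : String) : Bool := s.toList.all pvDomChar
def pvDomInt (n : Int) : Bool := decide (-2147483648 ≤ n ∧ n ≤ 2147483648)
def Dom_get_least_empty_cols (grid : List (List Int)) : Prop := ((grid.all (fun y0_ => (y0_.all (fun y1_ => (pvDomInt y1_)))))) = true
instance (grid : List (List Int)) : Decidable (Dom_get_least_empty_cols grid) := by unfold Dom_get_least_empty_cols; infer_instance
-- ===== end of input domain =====

-- B replaces A's running-minimum while loop (mutating cols/least) by a count-then-min-then-filter
-- decomposition; objective: simpler.

-- ===== PORT A =====
-- grid[i][j]; exact for the nonnegative in-range indices guaranteed by Pre_ (outside Pre_ Python raises IndexError)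
def pvCell (grid : List (List Int)) (i j : Nat) : Int := (grid.getD i []).getD j 0

-- the inner 'for i in range(len(grid)): if grid[i][j]==0: spaces += 1' loop
def pvA_spaces (grid : List (List Int)) (n j : Nat) : Int :=
  (List.range n).foldl (fun s i => if pvCell grid i j = 0 then s + 1 else s) 0

-- the 'while j < len(grid)' loop with state (cols, least_spaces_in_col)
def pvA_loop (grid : List (List Int)) (n : Nat) (j : Nat) (cols : List Int) (least : Int) : List Int :=
  if _h : j < n then
    let spaces := pvA_spaces grid n j
    if spaces = least then pvA_loop grid n (j + 1) (cols ++ [Int.ofNat j]) least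
    else if spaces < least then pvA_loop grid n (j + 1) [Int.ofNat j] spaces
    else pvA_loop grid n (j + 1) cols least
  else cols
termination_by n - j

def get_least_empty_cols (grid : List (List Int)) : List Int :=
  pvA_loop grid grid.length 0 [] (grid.length : Int)

-- ===== PORT B =====
-- sum(1 for i in range(n) if grid[i][j] == 0)
def pvB_count (grid : List (List Int)) (n j : Nat) : Int :=
  (((List.range n).filter (fun i => pvCell grid i j = 0)).length : Int)

def get_least_empty_cols_alt (grid : List (List Int)) : List Int :=
  let n := grid.length
  let counts := (List.range n).map (fun j => pvB_count grid n j)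
  match PySem.List.min? counts (fun x => x) with
  | none => []
  | some m => ((List.range n).filter (fun j => counts.getD j 0 = m)).map (fun j => Int.ofNat j)

-- ===== PRECONDITION & SPEC =====
-- Pre_ excludes ragged grids on which Python A raises IndexError (a row shorter than len(grid)).
def Pre_get_least_empty_cols (grid : List (List Int)) : Prop :=
  ∀ row ∈ grid, grid.length ≤ row.length
instance (grid : List (List Int)) : Decidable (Pre_get_least_empty_cols grid) := by
  unfold Pre_get_least_empty_cols; infer_instance

def pvWitness_get_least_empty_cols : List (List Int) := [[0, 1], [1, 0]]

def Spec_get_least_empty_cols (grid : List (List Int)) (out : List Int) : Prop := out = get_least_empty_cols_alt grid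
instance (grid : List (List Int)) (out : List Int) : Decidable (Spec_get_least_empty_cols grid out) := by unfold Spec_get_least_empty_cols; infer_instance

-- ===== CLAIM (what is proved, stated in full; the proofs are below) =====
def Claim_equal_get_least_empty_cols : Prop := ∀ (grid : List (List Int)), Dom_get_least_empty_cols grid → Pre_get_least_empty_cols grid → Spec_get_least_empty_cols grid (get_least_empty_cols grid)

-- ===== LEMMAS AND PROOFS =====

-- the running minimum after the first j columns: min over len(grid) and the first j column counts
def pvLmin (grid : List (List Int)) (n j : Nat) : Int :=
  ((List.range j).map (fun j' => pvB_count grid n j')).foldl min (n : Int)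

-- the cols list after the first j columns
def pvCols (grid : List (List Int)) (n j : Nat) : List Int :=
  ((List.range j).filter (fun j' => pvB_count grid n j' = pvLmin grid n j)).map (fun j' => Int.ofNat j')

lemma pv_spaces_eq_count (grid : List (List Int)) (n j : Nat) :
    pvA_spaces grid n j = pvB_count grid n j := by
  unfold pvA_spaces pvB_count
  suffices h : ∀ (l : List Nat) (s : Int),
      l.foldl (fun s i => if pvCell grid i j = 0 then s + 1 else s) s
        = s + ((l.filter (fun i => pvCell grid i j = 0)).length : Int) by
    simpa using h (List.range n) 0
  intro l
  induction l with
  | nil => simp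
  | cons a t ih =>
    intro s
    by_cases h : pvCell grid a j = 0
    · simp [h, ih]; ring
    · simp [h, ih]

lemma pv_count_le (grid : List (List Int)) (n j : Nat) :
    pvB_count grid n j ≤ (n : Int) := by
  unfold pvB_count
  have := List.length_filter_le (fun i => decide (pvCell grid i j = 0)) (List.range n)
  simp only [List.length_range] at this
  exact_mod_cast this

lemma pv_foldl_min_le_init : ∀ (l : List Int) (a : Int), l.foldl min a ≤ a := by
  intro l
  induction l with
  | nil => simp
  | cons x t ih => intro a; exact le_trans (ih (min a x)) (min_le_left a x)

lemma pv_foldl_min_le_mem : ∀ (l : List Int) (a x : Int), x ∈ l → l.foldl min a ≤ x := by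
  intro l
  induction l with
  | nil => intro a x hx; simp at hx
  | cons y t ih =>
    intro a x hx
    rcases List.mem_cons.mp hx with h | h
    · subst h; exact le_trans (pv_foldl_min_le_init t (min a x)) (min_le_right a x)
    · exact ih (min a y) x h

lemma pv_lmin_succ (grid : List (List Int)) (n j : Nat) :
    pvLmin grid n (j + 1) = min (pvLmin grid n j) (pvB_count grid n j) := by
  unfold pvLmin
  rw [List.range_succ, List.map_append, List.foldl_append]
  simp

lemma pv_lmin_le (grid : List (List Int)) (n j j' : Nat) (h : j' < j) :
    pvLmin grid n j ≤ pvB_count grid n j' := by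
  apply pv_foldl_min_le_mem
  exact List.mem_map.mpr ⟨j', List.mem_range.mpr h, rfl⟩

lemma pv_cols_succ_eq (grid : List (List Int)) (n j : Nat)
    (h : pvB_count grid n j = pvLmin grid n j) :
    pvCols grid n (j + 1) = pvCols grid n j ++ [Int.ofNat j] := by
  unfold pvCols
  have hl : pvLmin grid n (j + 1) = pvLmin grid n j := by
    rw [pv_lmin_succ, h, min_self]
  rw [hl, List.range_succ, List.filter_append, List.map_append]
  simp [h]

lemma pv_cols_succ_lt (grid : List (List Int)) (n j : Nat)
    (h : pvB_count grid n j < pvLmin grid n j) :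
    pvCols grid n (j + 1) = [Int.ofNat j] := by
  unfold pvCols
  have hl : pvLmin grid n (j + 1) = pvB_count grid n j := by
    rw [pv_lmin_succ]; exact min_eq_right h.le
  rw [hl, List.range_succ, List.filter_append]
  have hnil : (List.range j).filter (fun j' => pvB_count grid n j' = pvB_count grid n j) = [] := by
    apply List.filter_eq_nil_iff.mpr
    intro j' hj'
    have h1 : pvLmin grid n j ≤ pvB_count grid n j' :=
      pv_lmin_le grid n j j' (List.mem_range.mp hj')
    simp only [decide_eq_true_eq]
    intro heq
    omega
  rw [hnil]
  simp

lemma pv_cols_succ_gt (grid : List (List Int)) (n j : Nat)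
    (h : pvLmin grid n j < pvB_count grid n j) :
    pvCols grid n (j + 1) = pvCols grid n j := by
  unfold pvCols
  have hl : pvLmin grid n (j + 1) = pvLmin grid n j := by
    rw [pv_lmin_succ]; exact min_eq_left h.le
  rw [hl, List.range_succ, List.filter_append]
  have hnil : [j].filter (fun j' => pvB_count grid n j' = pvLmin grid n j) = [] := by
    simp [h.ne']
  rw [hnil]
  simp

lemma pv_loop_inv (grid : List (List Int)) (n : Nat) :
    ∀ (k j : Nat), j + k = n →
      pvA_loop grid n j (pvCols grid n j) (pvLmin grid n j) = pvCols grid n n := by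
  intro k
  induction k with
  | zero =>
    intro j hj
    rw [pvA_loop]
    simp [show j = n by omega]
  | succ k ih =>
    intro j hj
    have hjn : j < n := by omega
    rw [pvA_loop]
    simp only [hjn, dif_pos, pv_spaces_eq_count]
    rcases lt_trichotomy (pvB_count grid n j) (pvLmin grid n j) with hlt | heq | hgt
    · rw [if_neg (by omega), if_pos hlt]
      have h1 := pv_cols_succ_lt grid n j hlt
      have h2 : pvLmin grid n (j + 1) = pvB_count grid n j := by
        rw [pv_lmin_succ]; exact min_eq_right hlt.le
      rw [← h1, ← h2]
      exact ih (j + 1) (by omega)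
    · rw [if_pos heq]
      have h1 := pv_cols_succ_eq grid n j heq
      have h2 : pvLmin grid n (j + 1) = pvLmin grid n j := by
        rw [pv_lmin_succ, heq, min_self]
      rw [← h1, ← h2]
      exact ih (j + 1) (by omega)
    · rw [if_neg (by omega), if_neg (by omega)]
      have h1 := pv_cols_succ_gt grid n j hgt
      have h2 : pvLmin grid n (j + 1) = pvLmin grid n j := by
        rw [pv_lmin_succ]; exact min_eq_left hgt.le
      rw [← h1, ← h2]
      exact ih (j + 1) (by omega)

lemma pv_A_eq_cols (grid : List (List Int)) :
    get_least_empty_cols grid = pvCols grid grid.length grid.length := by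
  unfold get_least_empty_cols
  have h0c : pvCols grid grid.length 0 = [] := by simp [pvCols]
  have h0l : pvLmin grid grid.length 0 = (grid.length : Int) := by simp [pvLmin]
  rw [← h0c, ← h0l]
  exact pv_loop_inv grid grid.length grid.length 0 (by omega)

lemma pv_counts_getD (grid : List (List Int)) (n j : Nat) (h : j < n) :
    ((List.range n).map (fun j' => pvB_count grid n j')).getD j 0 = pvB_count grid n j := by
  rw [List.getD_eq_getElem?_getD]
  simp [h]

lemma pv_B_eq_cols (grid : List (List Int)) :
    get_least_empty_cols_alt grid = pvCols grid grid.length grid.length := by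
  unfold get_least_empty_cols_alt
  cases hn : grid.length with
  | zero =>
    have h0 : PySem.List.min? ([] : List Int) (fun x => x) = none := by rfl
    simp [pvCols, h0]
  | succ m =>
    set n := m + 1 with hn'
    have hne : (List.range n).map (fun j => pvB_count grid n j) ≠ [] := by
      simp [hn']
    obtain ⟨c, t, hct⟩ := List.exists_cons_of_ne_nil hne
    have hmin : PySem.List.min? ((List.range n).map (fun j => pvB_count grid n j)) (fun x => x)
        = some (t.foldl min c) := by
      rw [hct]; exact PySem.List.min?_id_cons c t
    have hc_le : c ≤ (n : Int) := by
      have hc_mem : c ∈ (List.range n).map (fun j => pvB_count grid n j) := by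
        rw [hct]; exact List.mem_cons_self
      obtain ⟨j', _, hj'⟩ := List.mem_map.mp hc_mem
      rw [← hj']; exact pv_count_le grid n j'
    have hfold : t.foldl min c = pvLmin grid n n := by
      unfold pvLmin
      rw [hct, List.foldl_cons, min_eq_right hc_le]
    simp only [hmin, hfold]
    unfold pvCols
    congr 1
    apply List.filter_congr
    intro j hj
    rw [pv_counts_getD grid n j (List.mem_range.mp hj)]

-- ===== VERDICT (by name: the statement is the Claim_ definition above) =====
theorem get_least_empty_cols_spec : Claim_equal_get_least_empty_cols := by
  intro grid _ _
  unfold Spec_get_least_empty_cols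
  rw [pv_A_eq_cols, pv_B_eq_cols]
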